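-- pv_equiv track=rewrite | github.com/charlesCXK/LeetCode-record | 954/954.py | canReorderDoubled
-- ===== SOURCE A (Python) =====
-- from typing import List
--
-- def canReorderDoubled(A: List[int]) -> bool:
--     posit, negat = [], []
--     for item in A:
--         if item > 0:
--             posit.append(item)
--         elif item < 0:
--             negat.append(abs(item))
--
--     def judgeValid(lst):
--         length = len(lst)
--         if length%2 == 1:
--             return False
--         if length == 0:
--             return True
--
--         max_num = max(lst)
--         table = [0 for i in range(max_num*2+100)]
--
--         for i in range(length):
--             table[lst[i]] += 1
--
--         for i in range((max_num*2+100)//2-1):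
--             if table[i]:
--                 table[i*2] -= table[i]
--                 if table[i*2] < 0:
--                     return False
--         return True
--
--     return judgeValid(posit) and judgeValid(negat)
-- ===== SOURCE B (Python) =====
-- from typing import List
--
-- def canReorderDoubled(A: List[int]) -> bool:
--     pos, neg = {}, {}
--     np = nn = 0
--     for x in A:
--         if x > 0:
--             pos[x] = pos.get(x, 0) + 1
--             np += 1
--         elif x < 0:
--             neg[-x] = neg.get(-x, 0) + 1
--             nn += 1
--
--     def ok(cnt, n):
--         if n % 2 == 1:
--             return False
--         for v in sorted(cnt):
--             c = cnt[v]
--             if c == 0: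
--                 continue
--             d = cnt.get(2 * v, 0)
--             if d < c:
--                 return False
--             cnt[2 * v] = d - c
--         return True
--
--     return ok(pos, np) and ok(neg, nn)
-- ===== Notes on version B (the rewrite author's own statement) =====
-- stated objective: alternative
-- what changed: A allocates a dense table of size 2*max_value+100 and scans every index up to max_value+48; B counts occurrences in a dict and greedily pairs only the sorted present values with their doubles, so the work is independent of the magnitude of the values.
import Mathlib
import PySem

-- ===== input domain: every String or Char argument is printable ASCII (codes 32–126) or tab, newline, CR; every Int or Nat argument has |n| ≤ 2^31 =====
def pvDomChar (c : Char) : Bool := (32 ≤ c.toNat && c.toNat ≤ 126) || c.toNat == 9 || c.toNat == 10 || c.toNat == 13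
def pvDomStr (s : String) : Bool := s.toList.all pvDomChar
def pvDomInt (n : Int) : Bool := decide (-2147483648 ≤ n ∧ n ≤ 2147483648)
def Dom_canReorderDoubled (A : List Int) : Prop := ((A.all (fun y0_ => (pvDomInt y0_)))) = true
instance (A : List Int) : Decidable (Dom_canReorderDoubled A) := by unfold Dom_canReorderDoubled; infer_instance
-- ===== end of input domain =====

-- B replaces A's dense table of size 2*max_value+100 by a dict counter whose sorted keys are
-- greedily paired with their doubles (objective: alternative algorithm, work independent of the
-- value magnitude); the return values agree on every input.

-- ===== PORT A =====
-- helper: the fill loop 'for i in range(length): table[lst[i]] += 1'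
-- (whenever judgeValid reaches this loop every lst[i] satisfies 1 ≤ lst[i] < len(table),
--  so indexing through .toNat / List.set / List.getD is exact)
def pvFillA (lst : List Int) (idxs : List Nat) (table : List Int) : List Int :=
  match idxs with
  | [] => table
  | i :: is =>
      let v := (lst.getD i 0).toNat
      pvFillA lst is (table.set v (table.getD v 0 + 1))

-- helper: the pairing loop 'for i in range((max_num*2+100)//2-1): …' with early return False
-- (Python assigns table[i*2] before the negative test; the assigned list is dropped on return
--  False, so testing the value first is the same computation; 0 ≤ i and 2*i < len(table) here)
def pvLoopA (table : List Int) (idxs : List Nat) : Bool :=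
  match idxs with
  | [] => true
  | i :: is =>
      let ti := table.getD i 0
      if ti ≠ 0 then
        let t2 := table.getD (2 * i) 0 - ti
        if t2 < 0 then false else pvLoopA (table.set (2 * i) t2) is
      else pvLoopA table is

def pvJudgeValid (lst : List Int) : Bool :=
  if lst.length % 2 == 1 then false
  else if lst.length == 0 then true
  else
    match PySem.List.max? lst (fun x => x) with
    | none => false          -- unreachable: lst ≠ [] on this branch, so max? is some
    | some max_num =>
        let size := (max_num * 2 + 100).toNat   -- max_num ≥ 1 whenever this is reached, so exact
        pvLoopA (pvFillA lst (List.range lst.length) (List.replicate size (0 : Int)))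
                (List.range (size / 2 - 1))

def canReorderDoubled (A : List Int) : Bool :=
  let pn := A.foldl (fun (pq : List Int × List Int) item =>
      if item > 0 then (pq.1 ++ [item], pq.2)
      else if item < 0 then (pq.1, pq.2 ++ [|item|])
      else pq) ([], [])
  pvJudgeValid pn.1 && pvJudgeValid pn.2

-- ===== PORT B =====
-- helper: 'for v in sorted(cnt): …' with early return False (ks = the sorted key list,
-- fixed before the loop; v is always a key of cnt, so cnt[v] = getD v 0 is exact)
def pvOkLoop (cnt : PySem.Dict Int Int) (ks : List Int) : Bool :=
  match ks with
  | [] => true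
  | v :: vs =>
      let c := cnt.getD v 0
      if c == 0 then pvOkLoop cnt vs
      else
        let d := cnt.getD (2 * v) 0
        if d < c then false
        else pvOkLoop (cnt.insert (2 * v) (d - c)) vs

def pvOk (cnt : PySem.Dict Int Int) (n : Int) : Bool :=
  if PySem.Int.mod n 2 == 1 then false
  else pvOkLoop cnt (PySem.List.sorted cnt.keys (fun x => x) false)

def canReorderDoubled_alt (A : List Int) : Bool :=
  let st := A.foldl
    (fun (st : PySem.Dict Int Int × PySem.Dict Int Int × Int × Int) x =>
      if x > 0 then (st.1.insert x (st.1.getD x 0 + 1), st.2.1, st.2.2.1 + 1, st.2.2.2)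
      else if x < 0 then (st.1, st.2.1.insert (-x) (st.2.1.getD (-x) 0 + 1), st.2.2.1, st.2.2.2 + 1)
      else st)
    (PySem.Dict.empty, PySem.Dict.empty, 0, 0)
  pvOk st.1 st.2.2.1 && pvOk st.2.1 st.2.2.2

-- ===== PRECONDITION & SPEC =====
def Spec_canReorderDoubled (A : List Int) (out : Bool) : Prop := out = canReorderDoubled_alt A
instance (A : List Int) (out : Bool) : Decidable (Spec_canReorderDoubled A out) := by unfold Spec_canReorderDoubled; infer_instance

-- ===== CLAIM (what is proved, stated in full; the proofs are below) =====
def Claim_equal_canReorderDoubled : Prop := ∀ (A : List Int), Dom_canReorderDoubled A → Spec_canReorderDoubled A (canReorderDoubled A)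

-- ===== LEMMAS AND PROOFS =====

def posOf (A : List Int) : List Int := A.filter (fun x => decide (0 < x))
def negOf (A : List Int) : List Int := (A.filter (fun x => decide (x < 0))).map (fun x => |x|)

lemma foldA_eq (A : List Int) : ∀ p q : List Int,
    A.foldl (fun (pq : List Int × List Int) item =>
      if item > 0 then (pq.1 ++ [item], pq.2)
      else if item < 0 then (pq.1, pq.2 ++ [|item|])
      else pq) (p, q) = (p ++ posOf A, q ++ negOf A) := by
  induction A with
  | nil => intro p q; simp [posOf, negOf]
  | cons x xs ih =>
      intro p q
      simp only [List.foldl_cons]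
      rcases lt_trichotomy 0 x with hx | hx | hx
      · simp [hx, not_lt.mpr (le_of_lt hx), ih, posOf, negOf]
      · subst hx; simp [ih, posOf, negOf]
      · simp [not_lt.mpr (le_of_lt hx), hx, ih, posOf, negOf]

def pvStep1 (d : PySem.Dict Int Int) (x : Int) : PySem.Dict Int Int := d.insert x (d.getD x 0 + 1)

lemma foldB_eq (A : List Int) : ∀ (p q : PySem.Dict Int Int) (a b : Int),
    A.foldl
      (fun (st : PySem.Dict Int Int × PySem.Dict Int Int × Int × Int) x =>
        if x > 0 then (st.1.insert x (st.1.getD x 0 + 1), st.2.1, st.2.2.1 + 1, st.2.2.2)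
        else if x < 0 then (st.1, st.2.1.insert (-x) (st.2.1.getD (-x) 0 + 1), st.2.2.1, st.2.2.2 + 1)
        else st) (p, q, a, b)
    = ((posOf A).foldl pvStep1 p, (negOf A).foldl pvStep1 q,
       a + (posOf A).length, b + (negOf A).length) := by
  induction A with
  | nil => intro p q a b; simp [posOf, negOf]
  | cons x xs ih =>
      intro p q a b
      simp only [List.foldl_cons]
      rcases lt_trichotomy 0 x with hx | hx | hx
      · rw [if_pos hx, ih]
        simp only [posOf, negOf, List.filter_cons, hx, decide_true, not_lt.mpr hx.le,
          decide_false, if_true, List.foldl_cons, List.length_cons, pvStep1]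
        refine Prod.ext rfl (Prod.ext rfl (Prod.ext ?_ rfl))
        push_cast; ring
      · subst hx; rw [ih]; simp [posOf, negOf, List.filter_cons]
      · rw [if_neg (not_lt.mpr hx.le), if_pos hx, ih]
        simp only [posOf, negOf, List.filter_cons, hx, decide_true, not_lt.mpr hx.le,
          decide_false, if_true, List.foldl_cons, List.length_cons, List.map_cons,
          pvStep1, abs_of_neg hx]
        refine Prod.ext rfl (Prod.ext rfl (Prod.ext rfl ?_))
        push_cast; ring

lemma getD_set_self (t : List Int) (n : Nat) (w : Int) (h : n < t.length) :
    (t.set n w).getD n 0 = w := by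
  simp [List.getD_eq_getElem?_getD, h]

lemma getD_set_ne (t : List Int) (n m : Nat) (w : Int) (h : m ≠ n) :
    (t.set n w).getD m 0 = t.getD m 0 := by
  simp [List.getD_eq_getElem?_getD, List.getElem?_set_ne (by omega : n ≠ m)]

def pvFillStep (t : List Int) (v : Int) : List Int := t.set v.toNat (t.getD v.toNat 0 + 1)

lemma pvFillA_eq_foldl (lst : List Int) : ∀ (idxs : List Nat) (t : List Int),
    pvFillA lst idxs t = (idxs.map (fun i => lst.getD i 0)).foldl pvFillStep t := by
  intro idxs
  induction idxs with
  | nil => intro t; simp [pvFillA]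
  | cons i is ih => intro t; simp [pvFillA, ih, pvFillStep]

lemma map_getD_range (lst : List Int) :
    (List.range lst.length).map (fun i => lst.getD i 0) = lst := by
  apply List.ext_getElem
  · simp
  · intro i h1 h2
    simp [List.getD_eq_getElem?_getD, List.getElem?_eq_getElem h2]

lemma length_foldl_fillStep (l : List Int) : ∀ t : List Int,
    (l.foldl pvFillStep t).length = t.length := by
  induction l with
  | nil => intro t; simp
  | cons v vs ih => intro t; simp [ih, pvFillStep]

lemma getD_foldl_fillStep (l : List Int) : ∀ (t : List Int) (j : Nat),
    (∀ v ∈ l, 0 < v ∧ v.toNat < t.length) →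
    (l.foldl pvFillStep t).getD j 0 = t.getD j 0 + l.count (j : Int) := by
  induction l with
  | nil => intro t j _; simp
  | cons v vs ih =>
      intro t j hall
      obtain ⟨hv, hvlen⟩ := hall v (by simp)
      have hrest : ∀ w ∈ vs, 0 < w ∧ w.toNat < (pvFillStep t v).length := by
        intro w hw
        have := hall w (by simp [hw])
        simpa [pvFillStep] using this
      rw [List.foldl_cons, ih _ j hrest]
      by_cases hj : j = v.toNat
      · subst hj
        have hjv : ((v.toNat : Int)) = v := Int.toNat_of_nonneg hv.le
        rw [show pvFillStep t v = t.set v.toNat (t.getD v.toNat 0 + 1) from rfl,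
          getD_set_self _ _ _ hvlen, hjv, List.count_cons_self]
        push_cast; ring
      · have hjv : ((j : Int)) ≠ v := by omega
        rw [show pvFillStep t v = t.set v.toNat (t.getD v.toNat 0 + 1) from rfl,
          getD_set_ne _ _ _ _ hj, List.count_cons]
        have hjv' : v ≠ (j : Int) := fun h => hjv h.symm
        simp [hjv']

-- cons-step unfolding of the two loops (definitional)
lemma pvLoopA_cons (t : List Int) (i : Nat) (is : List Nat) :
    pvLoopA t (i :: is) =
      if t.getD i 0 ≠ 0 then
        (if t.getD (2 * i) 0 - t.getD i 0 < 0 then false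
         else pvLoopA (t.set (2 * i) (t.getD (2 * i) 0 - t.getD i 0)) is)
      else pvLoopA t is := rfl

lemma pvOkLoop_cons (cnt : PySem.Dict Int Int) (v : Int) (vs : List Int) :
    pvOkLoop cnt (v :: vs) =
      if (cnt.getD v 0 == 0) then pvOkLoop cnt vs
      else if cnt.getD (2 * v) 0 < cnt.getD v 0 then false
      else pvOkLoop (cnt.insert (2 * v) (cnt.getD (2 * v) 0 - cnt.getD v 0)) vs := rfl

-- the central simulation: A's scan over all indices 0..K-1 of the dense table equals
-- B's scan over the (fixed) key list, provided table and dict agree pointwise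
lemma simAB : ∀ (idxs : List Nat) (d : PySem.Dict Int Int) (t : List Int),
    (∀ j : Nat, t.getD j 0 = d.getD (j : Int) 0) →
    (∀ k ∈ d.keys, 0 < k ∧ 2 * k.toNat < t.length) →
    (∀ k : Int, 0 ≤ d.getD k 0) →
    pvLoopA t idxs
      = pvOkLoop d ((idxs.filter (fun (i : Nat) => decide ((i : Int) ∈ d.keys))).map (fun (i : Nat) => (i : Int))) := by
  intro idxs
  induction idxs with
  | nil => intro d t _ _ _; simp [pvLoopA, pvOkLoop]
  | cons i is ih =>
      intro d t H1 H2 H4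
      by_cases hmem : (i : Int) ∈ d.keys
      · -- i is a key of d
        rw [List.filter_cons_of_pos (by simpa using hmem), List.map_cons, pvOkLoop_cons,
          pvLoopA_cons]
        by_cases hc : t.getD i 0 = 0
        · -- count 0: both sides skip
          rw [if_neg (show ¬(t.getD i 0 ≠ 0) by simpa using hc),
            if_pos (show (d.getD (i : Int) 0 == 0) = true by
              have h := H1 i; rw [beq_iff_eq]; omega)]
          exact ih d t H1 H2 H4
        · have hcd : d.getD (i : Int) 0 = t.getD i 0 := (H1 i).symm
          have h2len : 2 * i < t.length := by
            have := (H2 _ hmem).2; simpa using this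
          have hget2 : t.getD (2 * i) 0 = d.getD (2 * (i : Int)) 0 := by
            have := H1 (2 * i); push_cast at this ⊢; omega
          rw [if_pos (show t.getD i 0 ≠ 0 from hc),
            if_neg (show ¬((d.getD (i : Int) 0 == 0) = true) by
              have h := H1 i; rw [beq_iff_eq]; omega)]
          by_cases hneg : t.getD (2 * i) 0 - t.getD i 0 < 0
          · -- both fail
            rw [if_pos hneg,
              if_pos (show d.getD (2 * (i : Int)) 0 < d.getD (i : Int) 0 by
                rw [← hget2, hcd]; omega)]
          · -- both subtract and continue
            rw [if_neg hneg,
              if_neg (show ¬(d.getD (2 * (i : Int)) 0 < d.getD (i : Int) 0) by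
                rw [← hget2, hcd]; omega)]
            have hd2pos : 0 < d.getD (2 * (i : Int)) 0 := by
              have := H4 (i : Int)
              rw [← hget2]
              omega
            have hmem2 : (2 * (i : Int)) ∈ d.keys := by
              by_contra hno
              have : d.getD (2 * (i : Int)) 0 = 0 := by
                apply PySem.Dict.getD_of_not_contains
                rw [PySem.Dict.contains_eq_decide_mem_keys]
                simpa using hno
              omega
            set t' := t.set (2 * i) (t.getD (2 * i) 0 - t.getD i 0) with ht'
            set d' := d.insert (2 * (i : Int)) (d.getD (2 * (i : Int)) 0 - d.getD (i : Int) 0) with hd'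
            have hkeys : d'.keys = d.keys := by
              rw [hd']
              exact PySem.Dict.keys_insert_of_contains _ _
                (by rw [PySem.Dict.contains_eq_decide_mem_keys]; simpa using hmem2)
            have H1' : ∀ j : Nat, t'.getD j 0 = d'.getD (j : Int) 0 := by
              intro j
              rw [hd', PySem.Dict.getD_insert]
              by_cases hj : j = 2 * i
              · subst hj
                rw [if_pos (by push_cast; ring), ht', getD_set_self _ _ _ h2len, hget2, hcd]
              · rw [if_neg (by intro h; apply hj; omega), ht', getD_set_ne _ _ _ _ hj]
                exact H1 j
            have H2' : ∀ k ∈ d'.keys, 0 < k ∧ 2 * k.toNat < t'.length := by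
              intro k hk
              rw [hkeys] at hk
              have := H2 k hk
              simpa [ht'] using this
            have H4' : ∀ k : Int, 0 ≤ d'.getD k 0 := by
              intro k
              rw [hd', PySem.Dict.getD_insert]
              by_cases hk : k = 2 * (i : Int)
              · rw [if_pos hk, hcd]; omega
              · rw [if_neg hk]; exact H4 k
            rw [ih d' t' H1' H2' H4']
            have hfil : (is.filter (fun (j : Nat) => decide ((j : Int) ∈ d'.keys)))
                = (is.filter (fun (j : Nat) => decide ((j : Int) ∈ d.keys))) := by
              apply List.filter_congr
              intro j _
              simp [hkeys]
            rw [hfil]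
      · -- i is not a key: its table entry is 0, A skips it and the filter drops it
        have hz : t.getD i 0 = 0 := by
          rw [H1 i]
          apply PySem.Dict.getD_of_not_contains
          rw [PySem.Dict.contains_eq_decide_mem_keys]
          simpa using hmem
        rw [List.filter_cons_of_neg (by simpa using hmem), pvLoopA_cons,
          if_neg (by simpa using hz)]
        exact ih d t H1 H2 H4

lemma sorted_keys_eq (d : PySem.Dict Int Int) (K : Nat)
    (hnd : d.keys.Nodup)
    (hbound : ∀ k ∈ d.keys, 0 < k ∧ k.toNat < K) :
    PySem.List.sorted d.keys (fun x => x)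
      = ((List.range K).filter (fun (i : Nat) => decide ((i : Int) ∈ d.keys))).map
          (fun (i : Nat) => (i : Int)) := by
  have hpw : List.Pairwise (fun a b : Int => a < b)
      (((List.range K).filter (fun (i : Nat) => decide ((i : Int) ∈ d.keys))).map
        (fun (i : Nat) => (i : Int))) := by
    rw [List.pairwise_map]
    exact (List.pairwise_lt_range.filter _).imp (by intro a b h; exact_mod_cast h)
  apply PySem.List.sorted_eq_of_perm_of_pairwise_lt
  · rw [List.perm_ext_iff_of_nodup (hpw.imp ne_of_lt) hnd]
    intro a
    simp only [List.mem_map, List.mem_filter, List.mem_range, decide_eq_true_eq]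
    constructor
    · rintro ⟨i, ⟨_, hmem⟩, rfl⟩; exact hmem
    · intro ha
      obtain ⟨hapos, haK⟩ := hbound a ha
      exact ⟨a.toNat, ⟨haK, by rwa [Int.toNat_of_nonneg hapos.le]⟩, Int.toNat_of_nonneg hapos.le⟩
  · exact hpw

lemma judge_eq (lst : List Int) (hpos : ∀ x ∈ lst, 0 < x) :
    pvJudgeValid lst = pvOk (PySem.Dict.counter lst) (lst.length : Int) := by
  by_cases hnil : lst = []
  · subst hnil; decide
  · by_cases hodd : lst.length % 2 = 1
    · have hA : pvJudgeValid lst = false := by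
        unfold pvJudgeValid; rw [if_pos (by simpa using hodd)]
      have hB : pvOk (PySem.Dict.counter lst) (lst.length : Int) = false := by
        unfold pvOk
        rw [if_pos (show (PySem.Int.mod (lst.length : Int) 2 == 1) = true by
          rw [PySem.Int.mod_eq_emod_of_pos (by norm_num), beq_iff_eq]; omega)]
      rw [hA, hB]
    · obtain ⟨m, hm⟩ : ∃ m, PySem.List.max? lst (fun x => x) = some m := by
        cases h : PySem.List.max? lst (fun x => x) with
        | none => exact absurd ((PySem.List.max?_eq_none_iff _ _).mp h) hnil
        | some m => exact ⟨m, rfl⟩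
      have hmmem : m ∈ lst := PySem.List.max?_mem hm
      have hmpos : 0 < m := hpos m hmmem
      have hmax : ∀ y ∈ lst, y ≤ m := PySem.List.max?_isMax hm
      have hsize : (m * 2 + 100).toNat = 2 * m.toNat + 100 := by omega
      have hK : (2 * m.toNat + 100) / 2 - 1 = m.toNat + 49 := by omega
      have hA : pvJudgeValid lst
          = pvLoopA (pvFillA lst (List.range lst.length)
              (List.replicate (2 * m.toNat + 100) (0 : Int)))
              (List.range (m.toNat + 49)) := by
        unfold pvJudgeValid
        rw [if_neg (by simpa using hodd), if_neg (by simpa using hnil), hm]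
        simp only [hsize, hK]
      have hB : pvOk (PySem.Dict.counter lst) (lst.length : Int)
          = pvOkLoop (PySem.Dict.counter lst)
              (PySem.List.sorted (PySem.Dict.counter lst).keys (fun x => x)) := by
        unfold pvOk
        rw [if_neg (show ¬((PySem.Int.mod (lst.length : Int) 2 == 1) = true) by
          rw [PySem.Int.mod_eq_emod_of_pos (by norm_num), beq_iff_eq]
          omega)]
      rw [hA, hB]
      set d := PySem.Dict.counter lst with hd
      set t := pvFillA lst (List.range lst.length)
        (List.replicate (2 * m.toNat + 100) (0 : Int)) with ht
      have hkeymem : ∀ k, k ∈ d.keys ↔ k ∈ lst := by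
        intro k
        rw [hd, PySem.Dict.keys_counter, PySem.Set.mem_ofList]
      have htfold : t = lst.foldl pvFillStep (List.replicate (2 * m.toNat + 100) (0 : Int)) := by
        rw [ht, pvFillA_eq_foldl, map_getD_range]
      have hlen : t.length = 2 * m.toNat + 100 := by
        rw [htfold, length_foldl_fillStep, List.length_replicate]
      have H1 : ∀ j : Nat, t.getD j 0 = d.getD (j : Int) 0 := by
        intro j
        rw [htfold, getD_foldl_fillStep _ _ _ (by
          intro v hv
          refine ⟨hpos v hv, ?_⟩
          have := hmax v hv
          simp only [List.length_replicate]
          omega)]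
        rw [hd, PySem.Dict.getD_counter]
        simp [List.getD_eq_getElem?_getD]
      have H2 : ∀ k ∈ d.keys, 0 < k ∧ 2 * k.toNat < t.length := by
        intro k hk
        have hkl := (hkeymem k).mp hk
        have h1 := hpos k hkl
        have h2 := hmax k hkl
        exact ⟨h1, by rw [hlen]; omega⟩
      have H4 : ∀ k : Int, 0 ≤ d.getD k 0 := by
        intro k
        rw [hd, PySem.Dict.getD_counter]
        positivity
      rw [simAB (List.range (m.toNat + 49)) d t H1 H2 H4]
      rw [sorted_keys_eq d (m.toNat + 49) (hd ▸ PySem.Dict.nodup_keys_counter lst) (by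
        intro k hk
        have hkl := (hkeymem k).mp hk
        have h1 := hpos k hkl
        have h2 := hmax k hkl
        exact ⟨h1, by omega⟩)]

-- ===== VERDICT (by name: the statement is the Claim_ definition above) =====
lemma foldl_pvStep1_eq_counter (l : List Int) :
    l.foldl pvStep1 PySem.Dict.empty = PySem.Dict.counter l := by
  rw [← PySem.Dict.foldl_insert_getD_add_one_eq_counter]
  rfl

lemma posOf_pos (A : List Int) : ∀ x ∈ posOf A, 0 < x := by
  intro x hx
  rw [posOf, List.mem_filter] at hx
  simpa using hx.2

lemma negOf_pos (A : List Int) : ∀ x ∈ negOf A, 0 < x := by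
  intro x hx
  rw [negOf, List.mem_map] at hx
  obtain ⟨y, hy, rfl⟩ := hx
  rw [List.mem_filter] at hy
  have : y < 0 := by simpa using hy.2
  exact abs_pos.mpr (ne_of_lt this)

theorem canReorderDoubled_spec : Claim_equal_canReorderDoubled := by
  intro A _
  show canReorderDoubled A = canReorderDoubled_alt A
  unfold canReorderDoubled canReorderDoubled_alt
  rw [foldA_eq, foldB_eq]
  simp only [List.nil_append, zero_add, foldl_pvStep1_eq_counter]
  rw [judge_eq (posOf A) (posOf_pos A), judge_eq (negOf A) (negOf_pos A)]
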